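-- pv_equiv track=rewrite | github.com/WasimTTY/epicyon | webapp_utils.py | post_contains_public
-- ===== SOURCE A (Python) =====
-- def post_contains_public(post_json_object: {}) -> bool:
--     """Does the given post contain #Public
--     """
--     contains_public = False
--     if not post_json_object['object'].get('to'):
--         return contains_public
--
--     for to_address in post_json_object['object']['to']:
--         if to_address.endswith('#Public'):
--             contains_public = True
--             break
--         if not contains_public:
--             if post_json_object['object'].get('cc'):
--                 for to_address2 in post_json_object['object']['cc']:
--                     if to_address2.endswith('#Public'):
--                         contains_public = True
--                         break
--     return contains_public
-- ===== SOURCE B (Python) =====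
-- def post_contains_public(post_json_object: {}) -> bool:
--     """Does the given post contain #Public"""
--     obj = post_json_object['object']
--     to_list = obj.get('to')
--     if not to_list:
--         return False
--     if any(addr.endswith('#Public') for addr in to_list):
--         return True
--     cc_list = obj.get('cc')
--     if cc_list:
--         return any(addr.endswith('#Public') for addr in cc_list)
--     return False
-- ===== Notes on version B (the rewrite author's own statement) =====
-- stated objective: simpler
-- what changed: Replaces the nested loop that rescans the whole cc list once per non-matching to-address with two independent single passes (one over to, then at most one over cc), keeping the empty-to short-circuit.
import Mathlib
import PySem

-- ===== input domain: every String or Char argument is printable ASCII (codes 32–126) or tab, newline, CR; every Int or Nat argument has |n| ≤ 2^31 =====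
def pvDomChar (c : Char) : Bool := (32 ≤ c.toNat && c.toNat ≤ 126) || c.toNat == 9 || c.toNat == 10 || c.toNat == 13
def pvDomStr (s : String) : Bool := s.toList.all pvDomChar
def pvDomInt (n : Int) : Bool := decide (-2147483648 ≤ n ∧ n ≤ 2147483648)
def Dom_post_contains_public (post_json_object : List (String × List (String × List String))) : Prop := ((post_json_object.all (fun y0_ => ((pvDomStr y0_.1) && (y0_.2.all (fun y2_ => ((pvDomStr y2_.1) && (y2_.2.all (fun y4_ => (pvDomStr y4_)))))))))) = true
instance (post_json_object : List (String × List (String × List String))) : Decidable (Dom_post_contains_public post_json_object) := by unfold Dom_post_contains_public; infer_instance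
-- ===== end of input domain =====

-- B replaces A's nested per-element cc rescan with two independent single passes (objective: simpler).
-- Pre_ excludes exactly the inputs where A raises KeyError: no 'object' key in the top-level dict.


-- ===== PORT A =====
-- the cc rescan A performs inside the to-loop whenever contains_public is still False
def pvCcScanA (obj : PySem.Dict String (List String)) (acc : Bool) : Bool :=
  if !acc then
    match obj.get? "cc" with
    | some cc => if cc ≠ [] then cc.any (fun a => PySem.Str.endswith a "#Public") else acc
    | none => acc
  else acc

-- A's outer for-loop with its break
def pvLoopA (obj : PySem.Dict String (List String)) : List String → Bool → Bool
  | [], acc => acc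
  | a :: rest, acc =>
    if PySem.Str.endswith a "#Public" then true
    else pvLoopA obj rest (pvCcScanA obj acc)

def post_contains_public (post_json_object : List (String × List (String × List String))) : Bool :=
  match (PySem.Dict.mk post_json_object).get? "object" with
  | none => false  -- KeyError in Python; unreachable under Pre_
  | some objList =>
    let obj := PySem.Dict.mk objList
    match obj.get? "to" with
    | none => false
    | some toList =>
      if toList = [] then false
      else pvLoopA obj toList false

-- ===== PORT B =====
def post_contains_public_alt (post_json_object : List (String × List (String × List String))) : Bool :=
  match (PySem.Dict.mk post_json_object).get? "object" with
  | none => false  -- KeyError in Python; unreachable under Pre_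
  | some objList =>
    let obj := PySem.Dict.mk objList
    match obj.get? "to" with
    | none => false
    | some toList =>
      if toList = [] then false
      else if toList.any (fun a => PySem.Str.endswith a "#Public") then true
      else
        match obj.get? "cc" with
        | some ccList => if ccList ≠ [] then ccList.any (fun a => PySem.Str.endswith a "#Public") else false
        | none => false

-- ===== PRECONDITION & SPEC =====
-- Pre_ excludes exactly the inputs on which A raises KeyError: no 'object' key at top level.
def Pre_post_contains_public (post_json_object : List (String × List (String × List String))) : Prop :=
  ((PySem.Dict.mk post_json_object).get? "object").isSome = true
instance (post_json_object : List (String × List (String × List String))) : Decidable (Pre_post_contains_public post_json_object) := by unfold Pre_post_contains_public; infer_instance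

def pvWitness_post_contains_public : (List (String × List (String × List String))) :=
  [("object", [("to", ["alice", "https://www.w3.org/ns/activitystreams#Public"])])]

def Spec_post_contains_public (post_json_object : List (String × List (String × List String))) (out : Bool) : Prop := out = post_contains_public_alt post_json_object
instance (post_json_object : List (String × List (String × List String))) (out : Bool) : Decidable (Spec_post_contains_public post_json_object out) := by unfold Spec_post_contains_public; infer_instance

-- ===== CLAIM (what is proved, stated in full; the proofs are below) =====
def Claim_equal_post_contains_public : Prop := ∀ (post_json_object : List (String × List (String × List String))), Dom_post_contains_public post_json_object → Pre_post_contains_public post_json_object → Spec_post_contains_public post_json_object (post_contains_public post_json_object)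

-- ===== LEMMAS AND PROOFS =====

-- the cc-scan step is an 'or' with a fixed value C(obj)
def pvCcVal (obj : PySem.Dict String (List String)) : Bool :=
  match obj.get? "cc" with
  | some cc => if cc ≠ [] then cc.any (fun a => PySem.Str.endswith a "#Public") else false
  | none => false

theorem pvCcScanA_eq (obj : PySem.Dict String (List String)) (acc : Bool) :
    pvCcScanA obj acc = (acc || pvCcVal obj) := by
  cases acc <;> rfl

theorem pvLoopA_eq (obj : PySem.Dict String (List String)) (a : String) (l : List String) (acc : Bool) :
    pvLoopA obj (a :: l) acc
      = ((a :: l).any (fun x => PySem.Str.endswith x "#Public") || acc || pvCcVal obj) := by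
  induction l generalizing a acc with
  | nil =>
    show (if PySem.Str.endswith a "#Public" = true then true else pvLoopA obj [] (pvCcScanA obj acc))
        = _
    rw [pvCcScanA_eq]
    cases h : PySem.Str.endswith a "#Public" <;> cases acc <;> cases hC : pvCcVal obj <;>
      simp only [pvLoopA, List.any_cons, List.any_nil, h, hC,
        Bool.or_false, Bool.false_or, Bool.true_or, Bool.or_true, Bool.or_self] <;> rfl
  | cons b rest ih =>
    show (if PySem.Str.endswith a "#Public" = true then true
          else pvLoopA obj (b :: rest) (pvCcScanA obj acc)) = _
    rw [pvCcScanA_eq, ih b (acc || pvCcVal obj)]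
    cases h : PySem.Str.endswith a "#Public" <;> cases acc <;> cases hC : pvCcVal obj <;>
      simp only [List.any_cons, List.any_nil, h, hC,
        Bool.or_false, Bool.false_or, Bool.true_or, Bool.or_true, Bool.or_self] <;> rfl

-- ===== VERDICT (by name: the statement is the Claim_ definition above) =====
theorem post_contains_public_spec : Claim_equal_post_contains_public := by
  intro p _ _
  unfold Spec_post_contains_public post_contains_public post_contains_public_alt
  cases hobj : (PySem.Dict.mk p).get? "object" with
  | none => rfl
  | some objList =>
    simp only
    cases hto : (PySem.Dict.mk objList).get? "to" with
    | none => rfl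
    | some toList =>
      cases toList with
      | nil => rfl
      | cons a l =>
        simp only [if_neg (by simp : ¬ (a :: l = []))]
        rw [pvLoopA_eq]
        cases h : (a :: l).any (fun x => PySem.Str.endswith x "#Public")
        · simp only [h, Bool.false_or, Bool.or_false, if_neg (by simp : ¬ (false = true))]
          rfl
        · simp only [h, Bool.true_or, Bool.or_true]
          rfl
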